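-- pv_equiv track=rewrite | github.com/CharlesMcGowen/LivingArchive-Kage-pro | surge/agents/kontrol_team/recon_agent.py | _generate_countermeasures
-- ===== SOURCE A (Python) =====
-- from typing import Dict, Any, List
--
-- def _generate_countermeasures(threat_vectors: List[str]) -> List[str]:
--     """Generate countermeasures for threat vectors"""
--     countermeasures = []
--
--     if 'unencrypted_communication' in threat_vectors:
--         countermeasures.append("Implement TLS/SSL encryption")
--
--     if any('injection' in vector.lower() for vector in threat_vectors):
--         countermeasures.append("Implement input validation and sanitization")
--
--     if any('weak' in vector.lower() for vector in threat_vectors):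
--         countermeasures.append("Strengthen authentication mechanisms")
--
--     return countermeasures
-- ===== SOURCE B (Python) =====
-- from typing import List
--
-- def _generate_countermeasures(threat_vectors: List[str]) -> List[str]:
--     """Generate countermeasures for threat vectors (single pass over the data)."""
--     has_unencrypted = has_injection = has_weak = False
--     for vector in threat_vectors:
--         if vector == 'unencrypted_communication':
--             has_unencrypted = True
--         vl = vector.lower()
--         if 'injection' in vl:
--             has_injection = True
--         if 'weak' in vl:
--             has_weak = True
--     countermeasures = []
--     if has_unencrypted:
--         countermeasures.append("Implement TLS/SSL encryption")
--     if has_injection: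
--         countermeasures.append("Implement input validation and sanitization")
--     if has_weak:
--         countermeasures.append("Strengthen authentication mechanisms")
--     return countermeasures
-- ===== Notes on version B (the rewrite author's own statement) =====
-- stated objective: alternative
-- what changed: Replaces the three independent scans of threat_vectors (a list membership test and two any(...) generator scans, each lowering the strings again) with one loop that maintains three boolean flags and builds the result afterwards, lowering each vector exactly once.
import Mathlib
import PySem

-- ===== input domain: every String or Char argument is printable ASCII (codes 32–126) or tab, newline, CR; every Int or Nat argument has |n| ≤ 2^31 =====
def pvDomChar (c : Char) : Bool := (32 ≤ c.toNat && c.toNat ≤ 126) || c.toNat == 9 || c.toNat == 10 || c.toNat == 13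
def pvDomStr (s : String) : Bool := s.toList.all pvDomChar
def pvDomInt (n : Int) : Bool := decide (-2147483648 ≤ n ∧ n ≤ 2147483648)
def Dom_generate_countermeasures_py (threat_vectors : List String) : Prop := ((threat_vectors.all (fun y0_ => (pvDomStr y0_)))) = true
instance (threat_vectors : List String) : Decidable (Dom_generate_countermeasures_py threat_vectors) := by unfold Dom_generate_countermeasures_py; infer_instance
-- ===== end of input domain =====

-- ===== PORT A =====
def generate_countermeasures_py (threat_vectors : List String) : List String :=
  let countermeasures : List String := []
  let countermeasures :=
    if threat_vectors.contains "unencrypted_communication" then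
      countermeasures ++ ["Implement TLS/SSL encryption"] else countermeasures
  let countermeasures :=
    if threat_vectors.any (fun vector => PySem.Str.isIn "injection" (PySem.Str.lower vector)) then
      countermeasures ++ ["Implement input validation and sanitization"] else countermeasures
  let countermeasures :=
    if threat_vectors.any (fun vector => PySem.Str.isIn "weak" (PySem.Str.lower vector)) then
      countermeasures ++ ["Strengthen authentication mechanisms"] else countermeasures
  countermeasures

-- ===== PORT B =====
-- one pass: fold the three flags over the list, then emit the messages
def gcFlagStep (f : Bool × Bool × Bool) (vector : String) : Bool × Bool × Bool :=
  let vl := PySem.Str.lower vector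
  (f.1 || vector == "unencrypted_communication",
   f.2.1 || PySem.Str.isIn "injection" vl,
   f.2.2 || PySem.Str.isIn "weak" vl)

def generate_countermeasures_py_alt (threat_vectors : List String) : List String :=
  let flags := threat_vectors.foldl gcFlagStep (false, false, false)
  (if flags.1 then ["Implement TLS/SSL encryption"] else []) ++
  (if flags.2.1 then ["Implement input validation and sanitization"] else []) ++
  (if flags.2.2 then ["Strengthen authentication mechanisms"] else [])

-- ===== PRECONDITION & SPEC =====
def Spec_generate_countermeasures_py (threat_vectors : List String) (out : List String) : Prop := out = generate_countermeasures_py_alt threat_vectors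
instance (threat_vectors : List String) (out : List String) : Decidable (Spec_generate_countermeasures_py threat_vectors out) := by unfold Spec_generate_countermeasures_py; infer_instance

-- ===== CLAIM (what is proved, stated in full; the proofs are below) =====
def Claim_equal_generate_countermeasures_py : Prop := ∀ (threat_vectors : List String), Dom_generate_countermeasures_py threat_vectors → Spec_generate_countermeasures_py threat_vectors (generate_countermeasures_py threat_vectors)

-- ===== LEMMAS AND PROOFS =====

-- ===== VERDICT (by name: the statement is the Claim_ definition above) =====
lemma gcFlags_foldl (tv : List String) (a b c : Bool) :
    tv.foldl gcFlagStep (a, b, c) =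
      (a || tv.contains "unencrypted_communication",
       b || tv.any (fun v => PySem.Str.isIn "injection" (PySem.Str.lower v)),
       c || tv.any (fun v => PySem.Str.isIn "weak" (PySem.Str.lower v))) := by
  induction tv generalizing a b c with
  | nil => simp
  | cons h t ih =>
    simp only [List.foldl_cons, gcFlagStep, ih, List.contains_cons, List.any_cons]
    simp [Bool.or_assoc, BEq.comm]

theorem generate_countermeasures_py_spec : Claim_equal_generate_countermeasures_py := by
  intro tv _
  unfold Spec_generate_countermeasures_py generate_countermeasures_py generate_countermeasures_py_alt
  rw [gcFlags_foldl]
  simp only [Bool.false_or]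
  split_ifs <;> simp_all
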